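-- pv_equiv track=rewrite | github.com/devkavach22/L2-Analytics | fastapi-ocr/app/agent_orchestrator.py | _get_active_agents
-- ===== SOURCE A (Python) =====
-- def _get_active_agents(report_type):
--     """
--     SPEED OPTIMIZATION: Returns a set of agents required for the report.
--     This prevents running unnecessary agents.
--     """
--     rt = report_type.lower()
--     active = {"summary", "keywords", "decision"} # Defaults
--
--     # Trigger specialized agents based on keywords
--     if any(x in rt for x in ["financial", "market", "sales", "trend"]):
--         active.add("trends")
--         active.add("chart")
--
--     if any(x in rt for x in ["risk", "audit", "compliance", "legal", "fir", "criminal", "case"]):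
--         active.add("risks")
--
--     if any(x in rt for x in ["psych", "sentiment", "hr", "interrogation", "interview"]):
--         active.add("sentiment")
--         active.add("cognitive")
--
--     if any(x in rt for x in ["custody", "prison", "gang"]):
--         active.add("risks")
--         active.add("keywords")
--
--     if any(x in rt for x in ["comprehensive", "full", "detailed"]):
--         active.update({"trends", "risks", "sentiment", "cognitive", "chart"})
--
--     return active
-- ===== SOURCE B (Python) =====
-- _ALL_KEYWORDS = (
--     "financial", "market", "sales", "trend",
--     "risk", "audit", "compliance", "legal", "fir", "criminal", "case",
--     "psych", "sentiment", "hr", "interrogation", "interview",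
--     "custody", "prison", "gang",
--     "comprehensive", "full", "detailed",
-- )
--
--
-- def _get_active_agents(report_type):
--     rt = report_type.lower()
--     # One left-to-right scan of the text: at each position collect every
--     # keyword that starts there (instead of one substring search per keyword).
--     found = set()
--     for i in range(len(rt) + 1):
--         for kw in _ALL_KEYWORDS:
--             if rt.startswith(kw, i):
--                 found.add(kw)
--
--     active = {"summary", "keywords", "decision"}
--
--     if not found.isdisjoint(("financial", "market", "sales", "trend")):
--         active.update(("trends", "chart"))
--
--     if not found.isdisjoint(("risk", "audit", "compliance", "legal", "fir", "criminal", "case")):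
--         active.add("risks")
--
--     if not found.isdisjoint(("psych", "sentiment", "hr", "interrogation", "interview")):
--         active.update(("sentiment", "cognitive"))
--
--     if not found.isdisjoint(("custody", "prison", "gang")):
--         active.update(("risks", "keywords"))
--
--     if not found.isdisjoint(("comprehensive", "full", "detailed")):
--         active.update(("trends", "risks", "sentiment", "cognitive", "chart"))
--
--     return active
-- ===== Notes on version B (the rewrite author's own statement) =====
-- stated objective: alternative
-- what changed: Inverts the matching direction: instead of one substring search per keyword inside five if-blocks, B makes a single left-to-right scan of the lowered text, collecting every keyword that starts at each position into a set of matched keywords, and then decides each rule by a set-disjointness test against that set.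
import Mathlib
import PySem

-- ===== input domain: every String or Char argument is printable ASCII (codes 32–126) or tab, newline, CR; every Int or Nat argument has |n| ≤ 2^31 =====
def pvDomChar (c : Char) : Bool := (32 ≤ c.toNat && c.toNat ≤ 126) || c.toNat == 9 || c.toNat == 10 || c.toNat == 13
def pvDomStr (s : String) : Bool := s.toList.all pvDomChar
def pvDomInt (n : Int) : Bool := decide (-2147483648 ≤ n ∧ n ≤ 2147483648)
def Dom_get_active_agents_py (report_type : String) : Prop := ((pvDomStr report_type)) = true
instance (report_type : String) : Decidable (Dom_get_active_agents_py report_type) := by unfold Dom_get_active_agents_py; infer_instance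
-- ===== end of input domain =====

-- B inverts the matching direction: one left-to-right scan of the text collects every keyword
-- that starts at each position into a 'found' set, and each rule becomes a disjointness test
-- against 'found' (alternative decomposition; same agent sets, same return value).

-- ===== PORT A =====
def get_active_agents_py (report_type : String) : List String :=
  let rt := PySem.Str.lower report_type
  let active : PySem.Set String := PySem.Set.ofList ["summary", "keywords", "decision"]
  let active :=
    if ["financial", "market", "sales", "trend"].any (fun x => PySem.Str.isIn x rt) then
      PySem.Set.add (PySem.Set.add active "trends") "chart"
    else active
  let active :=
    if ["risk", "audit", "compliance", "legal", "fir", "criminal", "case"].any (fun x => PySem.Str.isIn x rt) then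
      PySem.Set.add active "risks"
    else active
  let active :=
    if ["psych", "sentiment", "hr", "interrogation", "interview"].any (fun x => PySem.Str.isIn x rt) then
      PySem.Set.add (PySem.Set.add active "sentiment") "cognitive"
    else active
  let active :=
    if ["custody", "prison", "gang"].any (fun x => PySem.Str.isIn x rt) then
      PySem.Set.add (PySem.Set.add active "risks") "keywords"
    else active
  let active :=
    if ["comprehensive", "full", "detailed"].any (fun x => PySem.Str.isIn x rt) then
      PySem.Set.update active ["trends", "risks", "sentiment", "cognitive", "chart"]
    else active
  active

-- ===== PORT B =====
def pvAllKeywords : List String :=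
  ["financial", "market", "sales", "trend",
   "risk", "audit", "compliance", "legal", "fir", "criminal", "case",
   "psych", "sentiment", "hr", "interrogation", "interview",
   "custody", "prison", "gang",
   "comprehensive", "full", "detailed"]

-- the scan loop of Source B: for i in range(len(rt)+1): for kw in _ALL_KEYWORDS: if rt.startswith(kw, i): found.add(kw)
-- (Python's rt.startswith(kw, i) with 0 ≤ i ≤ len(rt) is exactly rt[i:].startswith(kw))
def pvFoundKeywords (rt : String) : PySem.Set String :=
  (PySem.List.pyRange 0 (PySem.Str.len rt + 1) 1).foldl
    (fun found i =>
      pvAllKeywords.foldl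
        (fun found kw =>
          if PySem.Str.startswith (PySem.Str.slice rt (some i) none) kw then PySem.Set.add found kw
          else found)
        found)
    PySem.Set.empty

def get_active_agents_py_alt (report_type : String) : List String :=
  let rt := PySem.Str.lower report_type
  let found := pvFoundKeywords rt
  let active : PySem.Set String := PySem.Set.ofList ["summary", "keywords", "decision"]
  let active :=
    if !(PySem.Set.isdisjoint found ["financial", "market", "sales", "trend"]) then
      PySem.Set.update active ["trends", "chart"]
    else active
  let active :=
    if !(PySem.Set.isdisjoint found ["risk", "audit", "compliance", "legal", "fir", "criminal", "case"]) then
      PySem.Set.add active "risks"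
    else active
  let active :=
    if !(PySem.Set.isdisjoint found ["psych", "sentiment", "hr", "interrogation", "interview"]) then
      PySem.Set.update active ["sentiment", "cognitive"]
    else active
  let active :=
    if !(PySem.Set.isdisjoint found ["custody", "prison", "gang"]) then
      PySem.Set.update active ["risks", "keywords"]
    else active
  let active :=
    if !(PySem.Set.isdisjoint found ["comprehensive", "full", "detailed"]) then
      PySem.Set.update active ["trends", "risks", "sentiment", "cognitive", "chart"]
    else active
  active

-- ===== PRECONDITION & SPEC =====
def Spec_get_active_agents_py (report_type : String) (out : List String) : Prop := out = get_active_agents_py_alt report_type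
instance (report_type : String) (out : List String) : Decidable (Spec_get_active_agents_py report_type out) := by unfold Spec_get_active_agents_py; infer_instance

-- ===== CLAIM =====
def Claim_equal_get_active_agents_py : Prop := ∀ (report_type : String), Dom_get_active_agents_py report_type → Spec_get_active_agents_py report_type (get_active_agents_py report_type)

-- ===== LEMMAS AND PROOFS =====

-- membership in a fold that conditionally adds the scanned element itself
theorem pv_mem_foldl_addIf {α : Type} [BEq α] [LawfulBEq α] (p : α → Bool) :
    ∀ (xs : List α) (s : PySem.Set α) (y : α),
      (y ∈ xs.foldl (fun s x => if p x then PySem.Set.add s x else s) s) ↔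
        y ∈ s ∨ (y ∈ xs ∧ p y = true) := by
  intro xs
  induction xs with
  | nil => simp
  | cons x xs ih =>
      intro s y
      simp only [List.foldl_cons, ih]
      by_cases hpx : p x = true
      · rw [if_pos hpx]
        simp only [PySem.Set.mem_add, List.mem_cons]
        constructor
        · rintro (⟨h | rfl⟩ | h)
          · exact Or.inl h
          · exact Or.inr ⟨Or.inl rfl, hpx⟩
          · exact Or.inr ⟨Or.inr h.1, h.2⟩
        · rintro (h | ⟨rfl | h, hpy⟩)
          · exact Or.inl (Or.inl h)
          · exact Or.inl (Or.inr rfl)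
          · exact Or.inr ⟨h, hpy⟩
      · rw [if_neg hpx]
        simp only [List.mem_cons]
        constructor
        · rintro (h | h)
          · exact Or.inl h
          · exact Or.inr ⟨Or.inr h.1, h.2⟩
        · rintro (h | ⟨rfl | h, hpy⟩)
          · exact Or.inl h
          · exact absurd hpy hpx
          · exact Or.inr ⟨h, hpy⟩

-- membership in an outer fold whose step is characterised by a predicate q
theorem pv_mem_foldl_union {ι α : Type} (g : PySem.Set α → ι → PySem.Set α) (q : ι → α → Prop)
    (hg : ∀ s i y, y ∈ g s i ↔ y ∈ s ∨ q i y) :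
    ∀ (xs : List ι) (s : PySem.Set α) (y : α),
      (y ∈ xs.foldl g s) ↔ y ∈ s ∨ ∃ i ∈ xs, q i y := by
  intro xs
  induction xs with
  | nil => simp
  | cons x xs ih =>
      intro s y
      simp only [List.foldl_cons, ih, hg, List.mem_cons]
      constructor
      · rintro ((h | h) | ⟨i, hi, hq⟩)
        · exact Or.inl h
        · exact Or.inr ⟨x, Or.inl rfl, h⟩
        · exact Or.inr ⟨i, Or.inr hi, hq⟩
      · rintro (h | ⟨i, rfl | hi, hq⟩)
        · exact Or.inl (Or.inl h)
        · exact Or.inl (Or.inr hq)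
        · exact Or.inr ⟨i, hi, hq⟩

theorem pv_mem_found (rt : String) (y : String) :
    y ∈ pvFoundKeywords rt ↔ y ∈ pvAllKeywords ∧ PySem.Str.isIn y rt = true := by
  unfold pvFoundKeywords
  rw [pv_mem_foldl_union _
        (fun i y => y ∈ pvAllKeywords ∧ PySem.Str.startswith (PySem.Str.slice rt (some i) none) y = true)
        (fun s i y => pv_mem_foldl_addIf _ pvAllKeywords s y)]
  simp only [PySem.Set.empty, List.not_mem_nil, false_or, PySem.List.mem_pyRange_one]
  constructor
  · rintro ⟨i, ⟨hi0, _⟩, hall, hsw⟩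
    refine ⟨hall, ?_⟩
    rw [PySem.Str.isIn_eq, ← PySem.Chars.exists_prefix_drop_iff_isIn]
    refine ⟨i.toNat, ?_⟩
    rw [PySem.Str.startswith_eq, PySem.Str.toList_slice] at hsw
    rw [PySem.Chars.startswith_iff] at hsw
    rwa [PySem.Chars.slice, PySem.List.slice_from _ hi0] at hsw
  · rintro ⟨hall, hin⟩
    rw [PySem.Str.isIn_eq, ← PySem.Chars.exists_prefix_drop_iff_isIn] at hin
    obtain ⟨j, hj⟩ := hin
    refine ⟨(min j rt.toList.length : Nat), ⟨by positivity, ?_⟩, hall, ?_⟩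
    · rw [PySem.Str.len_eq]
      have : (min j rt.toList.length) ≤ rt.toList.length := Nat.min_le_right _ _
      omega
    · rw [PySem.Str.startswith_eq, PySem.Str.toList_slice, PySem.Chars.slice,
        PySem.List.slice_from _ (by positivity), PySem.Chars.startswith_iff]
      rcases Nat.le_total j rt.toList.length with hle | hle
      · rwa [Int.toNat_natCast, Nat.min_eq_left hle]
      · rw [Int.toNat_natCast, Nat.min_eq_right hle, List.drop_length]
        rw [List.drop_eq_nil_of_le hle] at hj
        exact hj
    
-- the scan-set disjointness test computes the same boolean as A's per-keyword search
theorem pv_cond_eq (rt : String) (kws : List String) (hsub : ∀ x ∈ kws, x ∈ pvAllKeywords) :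
    (!(PySem.Set.isdisjoint (pvFoundKeywords rt) kws)) =
      kws.any (fun x => PySem.Str.isIn x rt) := by
  rw [Bool.eq_iff_iff]
  simp only [PySem.Set.isdisjoint, Bool.not_not, List.any_eq_true, PySem.Set.contains,
    List.contains_iff_mem, pv_mem_found]
  constructor
  · rintro ⟨x, ⟨_, hin⟩, hx⟩
    exact ⟨x, hx, hin⟩
  · rintro ⟨x, hx, hin⟩
    exact ⟨x, ⟨hsub x hx, hin⟩, hx⟩

-- ===== VERDICT =====
set_option maxHeartbeats 1600000 in
theorem get_active_agents_py_spec : Claim_equal_get_active_agents_py := by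
  intro report_type _
  unfold Spec_get_active_agents_py get_active_agents_py get_active_agents_py_alt
  simp only [pv_cond_eq (PySem.Str.lower report_type) ["financial", "market", "sales", "trend"] (by decide),
      pv_cond_eq (PySem.Str.lower report_type) ["risk", "audit", "compliance", "legal", "fir", "criminal", "case"] (by decide),
      pv_cond_eq (PySem.Str.lower report_type) ["psych", "sentiment", "hr", "interrogation", "interview"] (by decide),
      pv_cond_eq (PySem.Str.lower report_type) ["custody", "prison", "gang"] (by decide),
      pv_cond_eq (PySem.Str.lower report_type) ["comprehensive", "full", "detailed"] (by decide)]
  set rt := PySem.Str.lower report_type with hrt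
  cases h1 : ["financial", "market", "sales", "trend"].any (fun x => PySem.Str.isIn x rt) <;>
  cases h2 : ["risk", "audit", "compliance", "legal", "fir", "criminal", "case"].any (fun x => PySem.Str.isIn x rt) <;>
  cases h3 : ["psych", "sentiment", "hr", "interrogation", "interview"].any (fun x => PySem.Str.isIn x rt) <;>
  cases h4 : ["custody", "prison", "gang"].any (fun x => PySem.Str.isIn x rt) <;>
  cases h5 : ["comprehensive", "full", "detailed"].any (fun x => PySem.Str.isIn x rt) <;>
  decide
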